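-- pv_equiv track=rewrite | github.com/devopstales/KubeDash | src/kubedash/lib/extension_api/projects.py | _filter_by_labels
-- ===== SOURCE A (Python) =====
-- from typing import List, Optional, Tuple
--
-- def _filter_by_labels(namespaces: List[dict], label_selector: str) -> List[dict]:
--     """
--     Filter namespaces by label selector.
--
--     Supports simple equality selectors like "key=value" or "key!=value".
--     Multiple selectors can be comma-separated.
--
--     Args:
--         namespaces: List of namespace data dicts
--         label_selector: Label selector string
--
--     Returns:
--         List[dict]: Filtered namespaces
--     """
--     if not label_selector:
--         return namespaces
--
--     filtered = []
--     selectors = label_selector.split(',')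
--
--     for ns in namespaces:
--         labels = ns.get("labels", {})
--         matches = True
--
--         for selector in selectors:
--             selector = selector.strip()
--
--             if '!=' in selector:
--                 key, value = selector.split('!=', 1)
--                 if labels.get(key.strip()) == value.strip():
--                     matches = False
--                     break
--             elif '=' in selector:
--                 key, value = selector.split('=', 1)
--                 if labels.get(key.strip()) != value.strip():
--                     matches = False
--                     break
--             else:
--                 # Existence check
--                 if selector not in labels:
--                     matches = False
--                     break
--
--         if matches:
--             filtered.append(ns)
--
--     return filtered
-- ===== SOURCE B (Python) =====
-- def _filter_by_labels(namespaces, label_selector):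
--     """Filter namespaces by label selector.
--
--     Different decomposition from the original: instead of iterating over
--     namespaces and checking every selector for each one, iterate over the
--     selectors and successively NARROW the candidate list with one filtering
--     pass per selector (relational-algebra style).  Correct because the
--     selectors are independent conditions and the result is their conjunction,
--     so composing filters equals filtering by the conjunction.
--     """
--     if not label_selector:
--         return namespaces
--
--     result = namespaces
--     for raw in label_selector.split(','):
--         s = raw.strip()
--         if '!=' in s:
--             k, v = s.split('!=', 1)
--             k, v = k.strip(), v.strip()
--             result = [ns for ns in result if ns.get("labels", {}).get(k) != v]
--         elif '=' in s:
--             k, v = s.split('=', 1)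
--             k, v = k.strip(), v.strip()
--             result = [ns for ns in result if ns.get("labels", {}).get(k) == v]
--         else:
--             result = [ns for ns in result if s in ns.get("labels", {})]
--     return result
-- ===== Notes on version B (the rewrite author's own statement) =====
-- stated objective: faster
-- what changed: Inverts the loop nesting: A iterates over namespaces and re-parses/checks every selector per namespace with a break flag; B iterates over the selectors, parsing each once and successively narrowing the candidate namespace list with one filter pass per selector.
import Mathlib
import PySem

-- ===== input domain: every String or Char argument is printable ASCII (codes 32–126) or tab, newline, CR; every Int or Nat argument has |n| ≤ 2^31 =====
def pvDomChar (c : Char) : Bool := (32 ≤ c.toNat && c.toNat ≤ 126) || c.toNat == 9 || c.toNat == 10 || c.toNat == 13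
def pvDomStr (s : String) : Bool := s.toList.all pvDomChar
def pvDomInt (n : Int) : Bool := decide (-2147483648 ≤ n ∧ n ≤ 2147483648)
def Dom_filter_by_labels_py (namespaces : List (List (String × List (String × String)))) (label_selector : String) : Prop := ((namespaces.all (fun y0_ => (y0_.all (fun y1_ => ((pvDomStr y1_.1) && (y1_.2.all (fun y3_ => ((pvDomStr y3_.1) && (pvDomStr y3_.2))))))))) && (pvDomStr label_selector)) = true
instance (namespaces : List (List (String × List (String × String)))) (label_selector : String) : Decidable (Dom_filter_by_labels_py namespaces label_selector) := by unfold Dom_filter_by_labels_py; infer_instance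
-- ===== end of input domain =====

-- B inverts A's loop nesting: A walks the namespaces re-checking every selector per namespace
-- with a break flag; B walks the selectors, narrowing the candidate list by one filter pass each.

-- ===== PORT A =====
-- inner 'for selector in selectors' loop with its break/matches flag, transliterated as recursion
def pvLoopA (selectors : List String) (labels : List (String × String)) : Bool :=
  match selectors with
  | [] => true
  | sel :: rest =>
    let selector := PySem.Str.strip sel
    if PySem.Str.isIn "!=" selector then
      -- 'key, value = selector.split('!=', 1)': '!=' ∈ selector guarantees exactly two parts,
      -- so extracting them positionally is exact
      let parts := (PySem.Str.splitMax? selector "!=" 1).getD []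
      let key := parts.getD 0 ""
      let value := parts.getD 1 ""
      if (PySem.Dict.mk labels).get? (PySem.Str.strip key) == some (PySem.Str.strip value) then
        false
      else pvLoopA rest labels
    else if PySem.Str.isIn "=" selector then
      let parts := (PySem.Str.splitMax? selector "=" 1).getD []
      let key := parts.getD 0 ""
      let value := parts.getD 1 ""
      if !((PySem.Dict.mk labels).get? (PySem.Str.strip key) == some (PySem.Str.strip value)) then
        false
      else pvLoopA rest labels
    else
      if !((PySem.Dict.mk labels).contains selector) then false
      else pvLoopA rest labels

def filter_by_labels_py (namespaces : List (List (String × List (String × String)))) (label_selector : String) : List (List (String × List (String × String))) :=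
  if label_selector = "" then namespaces
  else
    -- s.split(','): ',' ≠ "" so split? always returns some
    let selectors := (PySem.Str.split? label_selector ",").getD []
    namespaces.foldl
      (fun filtered ns =>
        let labels := (PySem.Dict.mk ns).getD "labels" []
        if pvLoopA selectors labels then filtered ++ [ns] else filtered)
      []

-- ===== PORT B =====
-- one narrowing pass of the candidate list for ONE raw selector (B's loop body)
def pvNarrow (result : List (List (String × List (String × String)))) (raw : String) : List (List (String × List (String × String))) :=
  let s := PySem.Str.strip raw
  if PySem.Str.isIn "!=" s then
    -- 'k, v = s.split('!=', 1)': '!=' ∈ s guarantees exactly two parts, positional extraction is exact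
    let parts := (PySem.Str.splitMax? s "!=" 1).getD []
    let k := PySem.Str.strip (parts.getD 0 "")
    let v := PySem.Str.strip (parts.getD 1 "")
    result.filter (fun ns => !((PySem.Dict.mk ((PySem.Dict.mk ns).getD "labels" [])).get? k == some v))
  else if PySem.Str.isIn "=" s then
    let parts := (PySem.Str.splitMax? s "=" 1).getD []
    let k := PySem.Str.strip (parts.getD 0 "")
    let v := PySem.Str.strip (parts.getD 1 "")
    result.filter (fun ns => (PySem.Dict.mk ((PySem.Dict.mk ns).getD "labels" [])).get? k == some v)
  else
    result.filter (fun ns => (PySem.Dict.mk ((PySem.Dict.mk ns).getD "labels" [])).contains s)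

def filter_by_labels_py_alt (namespaces : List (List (String × List (String × String)))) (label_selector : String) : List (List (String × List (String × String))) :=
  if label_selector = "" then namespaces
  else
    -- s.split(','): ',' ≠ "" so split? always returns some
    ((PySem.Str.split? label_selector ",").getD []).foldl pvNarrow namespaces

-- ===== PRECONDITION & SPEC =====
def Spec_filter_by_labels_py (namespaces : List (List (String × List (String × String)))) (label_selector : String) (out : List (List (String × List (String × String)))) : Prop := out = filter_by_labels_py_alt namespaces label_selector
instance (namespaces : List (List (String × List (String × String)))) (label_selector : String) (out : List (List (String × List (String × String)))) : Decidable (Spec_filter_by_labels_py namespaces label_selector out) := by unfold Spec_filter_by_labels_py; infer_instance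

-- ===== CLAIM (what is proved, stated in full; the proofs are below) =====
def Claim_equal_filter_by_labels_py : Prop := ∀ (namespaces : List (List (String × List (String × String)))) (label_selector : String), Dom_filter_by_labels_py namespaces label_selector → Spec_filter_by_labels_py namespaces label_selector (filter_by_labels_py namespaces label_selector)

-- ===== LEMMAS AND PROOFS =====

-- the boolean value of ONE raw selector on a namespace (proof-side characterisation)
def pvSelOk (raw : String) (ns : List (String × List (String × String))) : Bool :=
  let s := PySem.Str.strip raw
  let labels := (PySem.Dict.mk ns).getD "labels" []
  if PySem.Str.isIn "!=" s then
    let parts := (PySem.Str.splitMax? s "!=" 1).getD []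
    !((PySem.Dict.mk labels).get? (PySem.Str.strip (parts.getD 0 "")) == some (PySem.Str.strip (parts.getD 1 "")))
  else if PySem.Str.isIn "=" s then
    let parts := (PySem.Str.splitMax? s "=" 1).getD []
    (PySem.Dict.mk labels).get? (PySem.Str.strip (parts.getD 0 "")) == some (PySem.Str.strip (parts.getD 1 ""))
  else
    (PySem.Dict.mk labels).contains s

-- each narrowing pass is a filter by pvSelOk
theorem pvNarrow_eq_filter (result : List (List (String × List (String × String)))) (raw : String) :
    pvNarrow result raw = result.filter (pvSelOk raw) := by
  unfold pvNarrow pvSelOk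
  by_cases h1 : PySem.Str.isIn "!=" (PySem.Str.strip raw) = true
  · simp only [h1, if_true]
  · simp only [h1, Bool.false_eq_true, if_false]
    by_cases h2 : PySem.Str.isIn "=" (PySem.Str.strip raw) = true
    · simp only [h2, if_true]
    · simp only [h2, Bool.false_eq_true, if_false]

theorem pvBeqDecide {α : Type} [DecidableEq α] [BEq α] [LawfulBEq α] (x y : α) :
    (x == y) = decide (x = y) := by
  by_cases hxy : x = y
  · simp [hxy]
  · simp [hxy, beq_eq_false_iff_ne]

-- A's break-flag loop on a namespace's labels is the conjunction of the per-selector booleans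
theorem pvLoopA_eq_all (selectors : List String) (ns : List (String × List (String × String))) :
    pvLoopA selectors ((PySem.Dict.mk ns).getD "labels" []) = selectors.all (fun raw => pvSelOk raw ns) := by
  induction selectors with
  | nil => rfl
  | cons sel rest ih =>
    rw [List.all_cons, ← ih, pvLoopA, pvSelOk]
    by_cases h1 : PySem.Str.isIn "!=" (PySem.Str.strip sel) = true
    · simp only [h1, if_true]
      simp [pvBeqDecide]
    · simp only [h1, Bool.false_eq_true, if_false]
      by_cases h2 : PySem.Str.isIn "=" (PySem.Str.strip sel) = true
      · simp only [h2, if_true]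
        simp [pvBeqDecide]
      · simp only [h2, Bool.false_eq_true, if_false]
        by_cases h4 : (PySem.Dict.mk ((PySem.Dict.mk ns).getD "labels" [])).contains (PySem.Str.strip sel) = true
        · simp [h4]
        · simp [h4]
-- composing the narrowing passes filters by the conjunction of all selectors
theorem foldl_pvNarrow (selectors : List String) (l : List (List (String × List (String × String)))) :
    selectors.foldl pvNarrow l = l.filter (fun ns => selectors.all (fun raw => pvSelOk raw ns)) := by
  induction selectors generalizing l with
  | nil => simp
  | cons sel rest ih =>
    rw [List.foldl_cons, pvNarrow_eq_filter, ih, List.filter_filter]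
    apply List.filter_congr
    intro ns _
    simp [Bool.and_comm]

-- ===== VERDICT (by name: the statement is the Claim_ definition above) =====
theorem filter_by_labels_py_spec : Claim_equal_filter_by_labels_py := by
  intro namespaces label_selector _
  unfold Spec_filter_by_labels_py filter_by_labels_py filter_by_labels_py_alt
  by_cases h : label_selector = ""
  · simp [h]
  · simp only [h, if_false]
    rw [PySem.List.foldl_append_if_eq_filter, foldl_pvNarrow]
    apply List.filter_congr
    intro ns _
    exact pvLoopA_eq_all _ ns
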